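-- pv_equiv track=rewrite | github.com/av8ramit/exceleratelive | userauth/Library/Values.py | string_to_array
-- ===== SOURCE A (Python) =====
-- def string_to_array(data):
--   data = data[1:-1]
--   array = []
--   data = data.replace(' ', "")
--   data = data.replace('(', "")
--   data = data.replace(')', "")
--   data = data.replace("'", "")
--   data = data.split(',')
--   i = 0
--   for entry in data:
--     if i % 2 == 0:
--       q_id = entry
--     if i % 2 == 1:
--       array.append((q_id, entry))
--     i+=1
--   return array
-- ===== SOURCE B (Python) =====
-- def string_to_array(data):
--   # single pass over the characters: skip junk chars, flush tokens at commas,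
--   # emit a pair whenever a second token completes
--   result = []
--   pending = None
--   token = ""
--   for ch in data[1:-1]:
--     if ch in " ()'":
--       continue
--     if ch == ',':
--       if pending is None:
--         pending = token
--       else:
--         result.append((pending, token))
--         pending = None
--       token = ""
--     else:
--       token += ch
--   if pending is not None:
--     result.append((pending, token))
--   return result
-- ===== Notes on version B (the rewrite author's own statement) =====
-- stated objective: alternative
-- what changed: A's four whole-string replace passes, a split pass and an index-parity pairing loop are replaced by ONE character-level state machine: a single scan over data[1:-1] that skips junk characters, flushes the current token at each comma, and emits a pair whenever a second token completes (no replace, no split, no index counter).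
import Mathlib
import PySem

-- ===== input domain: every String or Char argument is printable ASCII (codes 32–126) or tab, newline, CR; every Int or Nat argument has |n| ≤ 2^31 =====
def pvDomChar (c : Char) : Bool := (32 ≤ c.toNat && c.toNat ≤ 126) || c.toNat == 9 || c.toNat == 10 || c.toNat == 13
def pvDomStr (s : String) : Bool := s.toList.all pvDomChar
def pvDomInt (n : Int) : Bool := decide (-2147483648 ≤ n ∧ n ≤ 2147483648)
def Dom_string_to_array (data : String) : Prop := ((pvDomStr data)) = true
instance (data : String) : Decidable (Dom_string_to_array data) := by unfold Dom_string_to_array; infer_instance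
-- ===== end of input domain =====

-- B replaces A's staged pipeline (four replace passes, a split pass, an index-parity
-- pairing loop) by a single character-level scan with a pending/token state machine;
-- objective: alternative (one pass instead of five, no measured speed claim).

-- ===== PORT A =====
-- one loop step of A: q_id update on even i, append on odd i, i += 1
def pvStepA (st : List (String × String) × Int × String) (entry : String) :
    List (String × String) × Int × String :=
  let q := if PySem.Int.mod st.2.1 2 == 0 then entry else st.2.2
  let arr := if PySem.Int.mod st.2.1 2 == 1 then st.1 ++ [(q, entry)] else st.1
  (arr, st.2.1 + 1, q)

def string_to_array (data : String) : List (String × String) :=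
  let d := PySem.Str.slice data (some 1) (some (-1))
  let d := PySem.Str.replace d " " ""
  let d := PySem.Str.replace d "(" ""
  let d := PySem.Str.replace d ")" ""
  let d := PySem.Str.replace d "'" ""
  -- split? is none only for the empty separator; "," is non-empty, so getD [] is unreachable
  let parts := (PySem.Str.split? d ",").getD []
  (parts.foldl pvStepA ([], 0, "")).1

-- ===== PORT B =====
-- one step of B's scan: skip junk, flush the token at ',', otherwise extend the token
-- (the Python str token is ported as its List Char of code points)
def pvStepB (st : List (String × String) × Option String × List Char) (ch : Char) :
    List (String × String) × Option String × List Char :=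
  if ch ∈ [' ', '(', ')', '\''] then st
  else if ch == ',' then
    match st.2.1 with
    | none => (st.1, some (String.ofList st.2.2), [])
    | some p => (st.1 ++ [(p, String.ofList st.2.2)], none, [])
  else (st.1, st.2.1, st.2.2 ++ [ch])

-- the trailing flush after the loop: `if pending is not None: result.append(...)`
def pvFinish (st : List (String × String) × Option String × List Char) : List (String × String) :=
  match st.2.1 with
  | some p => st.1 ++ [(p, String.ofList st.2.2)]
  | none => st.1

def string_to_array_alt (data : String) : List (String × String) :=
  pvFinish ((PySem.Str.slice data (some 1) (some (-1))).toList.foldl pvStepB ([], none, []))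

-- ===== PRECONDITION & SPEC =====
def Spec_string_to_array (data : String) (out : List (String × String)) : Prop := out = string_to_array_alt data
instance (data : String) (out : List (String × String)) : Decidable (Spec_string_to_array data out) := by unfold Spec_string_to_array; infer_instance

-- ===== CLAIM (what is proved, stated in full; the proofs are below) =====
def Claim_equal_string_to_array : Prop := ∀ (data : String), Dom_string_to_array data → Spec_string_to_array data (string_to_array data)

-- ===== LEMMAS AND PROOFS =====

-- the characters A's replace passes delete
def pvKeep (c : Char) : Bool := (c != ' ') && (c != '(') && (c != ')') && (c != '\'')

-- tokens of a (junk-free) char list, comma-separated, current token cur in order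
def pvSplitTok : List Char → List Char → List (List Char)
  | [], cur => [cur]
  | c :: t, cur => if c = ',' then cur :: pvSplitTok t [] else pvSplitTok t (cur ++ [c])

-- pair up tokens two at a time, an optional pending first component
def pvPairT : Option String → List (List Char) → List (String × String)
  | none, a :: b :: rest => (String.ofList a, String.ofList b) :: pvPairT none rest
  | some p, t :: rest => (p, String.ofList t) :: pvPairT none rest
  | _, _ => []

lemma pv_replace_go_filter (c : Char) :
    ∀ (fuel : Nat) (l acc : List Char), l.length ≤ fuel →
      PySem.Chars.replace.go [c] [] fuel l acc = acc.reverse ++ l.filter (fun x => x != c) := by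
  intro fuel
  induction fuel with
  | zero =>
    intro l acc h
    have hl : l = [] := List.eq_nil_of_length_eq_zero (Nat.le_zero.mp h)
    subst hl; simp [PySem.Chars.replace.go]
  | succ n ih =>
    intro l acc h
    cases l with
    | nil => simp [PySem.Chars.replace.go]
    | cons a t =>
      by_cases hac : a = c
      · subst hac
        simp only [PySem.Chars.replace.go]
        rw [if_pos (by simp [List.isPrefixOf])]
        rw [show List.drop [a].length (a :: t) = t by simp]
        simp only [List.reverse_nil, List.nil_append]
        rw [ih t acc (by simpa using h)]
        simp
      · simp only [PySem.Chars.replace.go]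
        rw [if_neg (by simp [List.isPrefixOf]; exact fun hh => hac hh.symm)]
        rw [ih t (a :: acc) (by simpa using h)]
        simp [hac]

lemma pv_replace_filter (cs : List Char) (c : Char) :
    PySem.Chars.replace cs [c] [] = cs.filter (fun x => x != c) := by
  simp only [PySem.Chars.replace, List.isEmpty_cons, Bool.false_eq_true, if_false]
  rw [pv_replace_go_filter c cs.length cs [] le_rfl]
  simp

lemma pv_splitOn_go (fuel : Nat) :
    ∀ (l cur : List Char) (acc : List (List Char)), l.length ≤ fuel →
      PySem.Chars.splitOn.go [','] fuel l cur acc = acc.reverse ++ pvSplitTok l cur.reverse := by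
  induction fuel with
  | zero =>
    intro l cur acc h
    have hl : l = [] := List.eq_nil_of_length_eq_zero (Nat.le_zero.mp h)
    subst hl; simp [PySem.Chars.splitOn.go, pvSplitTok]
  | succ n ih =>
    intro l cur acc h
    cases l with
    | nil => simp [PySem.Chars.splitOn.go, pvSplitTok]
    | cons a t =>
      by_cases hac : a = ','
      · subst hac
        simp only [PySem.Chars.splitOn.go]
        rw [if_pos (by simp [List.isPrefixOf])]
        rw [show List.drop [','].length (',' :: t) = t by simp]
        rw [ih t [] (cur.reverse :: acc) (by simpa using h)]
        simp [pvSplitTok]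
      · simp only [PySem.Chars.splitOn.go]
        rw [if_neg (by simp [List.isPrefixOf]; exact fun hh => hac hh.symm)]
        rw [ih t (a :: cur) acc (by simpa using h)]
        simp [pvSplitTok, hac]

lemma pv_splitOn_comma (cs : List Char) :
    PySem.Chars.splitOn cs [','] = pvSplitTok cs [] := by
  simp only [PySem.Chars.splitOn]
  rw [pv_splitOn_go (cs.length + 1) cs [] [] (by omega)]
  simp

-- pairing the token list two at a time
def pvPairUpC : List (List Char) → List (String × String)
  | a :: b :: rest => (String.ofList a, String.ofList b) :: pvPairUpC rest
  | _ => []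

lemma pv_pairT_none (ts : List (List Char)) : pvPairT none ts = pvPairUpC ts := by
  induction ts using pvPairUpC.induct with
  | case1 a b rest ih => simp [pvPairT, pvPairUpC, ih]
  | case2 x h =>
    cases x with
    | nil => simp [pvPairT, pvPairUpC]
    | cons a t =>
      cases t with
      | nil => simp [pvPairT, pvPairUpC]
      | cons b rest => exact absurd rfl (h a b rest)

lemma pv_pairT_shift (cur : List Char) (ts : List (List Char)) :
    pvPairT none (cur :: ts) = pvPairT (some (String.ofList cur)) ts := by
  cases ts <;> simp [pvPairT, pv_pairT_none]

-- A's index-parity loop over the token list is exactly the two-at-a-time pairing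
lemma pv_mod_even (n : Nat) : PySem.Int.mod (2 * (n : Int)) 2 = 0 :=
  (PySem.Int.mod_eq_zero_iff_dvd _ _).mpr ⟨n, by ring⟩

lemma pv_mod_odd (n : Nat) : PySem.Int.mod (2 * (n : Int) + 1) 2 = 1 := by
  rcases PySem.Int.mod_two_eq (2 * (n : Int) + 1) with h | h
  · rcases (PySem.Int.mod_eq_zero_iff_dvd _ _).mp h with ⟨k, hk⟩
    omega
  · exact h

lemma pv_loop_eq (ts : List (List Char)) :
    ∀ (arr : List (String × String)) (n : Nat) (q : String),
      ((ts.map String.ofList).foldl pvStepA (arr, (2 * (n : Int)), q)).1 = arr ++ pvPairUpC ts := by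
  induction ts using pvPairUpC.induct with
  | case1 a b rest ih =>
    intro arr n q
    have he := pv_mod_even n
    have ho := pv_mod_odd n
    simp only [List.map, List.foldl, pvStepA, he, ho]
    norm_num
    rw [show (2 * (n : Int) + 1 + 1) = 2 * (((n + 1 : Nat)) : Int) by push_cast; ring]
    rw [ih (arr ++ [(String.ofList a, String.ofList b)]) (n + 1) (String.ofList a)]
    simp [pvPairUpC]
  | case2 x h =>
    intro arr n q
    cases x with
    | nil => simp [pvPairUpC]
    | cons a t =>
      cases t with
      | nil => simp [List.foldl, pvStepA, pvPairUpC]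
      | cons b rest => exact absurd rfl (h a b rest)

-- B's scan invariant: the state machine computes the pairing of the comma tokens
-- of the junk-filtered remainder, given the tokens already read
lemma pv_scan_eq (cs : List Char) :
    ∀ (res : List (String × String)) (pend : Option String) (cur : List Char),
      pvFinish (cs.foldl pvStepB (res, pend, cur)) =
        res ++ pvPairT pend (pvSplitTok (cs.filter pvKeep) cur) := by
  induction cs with
  | nil =>
    intro res pend cur
    cases pend <;> simp [pvFinish, pvSplitTok, pvPairT, pv_pairT_none, pvPairUpC]
  | cons c t ih =>
    intro res pend cur
    by_cases hj : c ∈ [' ', '(', ')', '\'']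
    · have hk : pvKeep c = false := by
        simp only [List.mem_cons, List.not_mem_nil, or_false] at hj
        unfold pvKeep
        rcases hj with h | h | h | h <;> simp [h]
      simp only [List.foldl, pvStepB, if_pos hj, List.filter_cons, hk]
      exact ih res pend cur
    · have hk : pvKeep c = true := by
        simp only [List.mem_cons, List.not_mem_nil, or_false, not_or] at hj
        simp [pvKeep, hj.1, hj.2.1, hj.2.2.1, hj.2.2.2]
      by_cases hc : c = ','
      · subst hc
        cases pend with
        | none =>
          simp only [List.foldl, pvStepB, if_neg hj, List.filter_cons, hk, beq_self_eq_true, if_true]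
          rw [ih res (some (String.ofList cur)) []]
          simp [pvSplitTok, pv_pairT_shift]
        | some p =>
          simp only [List.foldl, pvStepB, if_neg hj, List.filter_cons, hk, beq_self_eq_true, if_true]
          rw [ih (res ++ [(p, String.ofList cur)]) none []]
          simp [pvSplitTok, pvPairT]
      · have hcb : (c == ',') = false := by simp [hc]
        simp only [List.foldl, pvStepB, if_neg hj, hcb, Bool.false_eq_true, if_false,
          List.filter_cons, hk]
        rw [ih res pend (cur ++ [c])]
        simp [pvSplitTok, hc]

-- the four single-character replace passes are one filter
lemma pv_filter_chain (cs : List Char) :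
    ((((cs.filter (fun x => x != ' ')).filter (fun x => x != '(')).filter
        (fun x => x != ')')).filter (fun x => x != '\'')) = cs.filter pvKeep := by
  simp only [List.filter_filter]
  apply List.filter_congr
  intro a _
  simp [pvKeep, Bool.and_comm, Bool.and_assoc, Bool.and_left_comm]

theorem string_to_array_spec : Claim_equal_string_to_array := by
  intro data _
  unfold Spec_string_to_array string_to_array string_to_array_alt
  simp only [PySem.Str.replace, PySem.Str.split?, PySem.Chars.split?]
  rw [show (" " : String).toList = [' '] from rfl, show ("(" : String).toList = ['('] from rfl,
    show (")" : String).toList = [')'] from rfl, show ("'" : String).toList = ['\''] from rfl,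
    show ("," : String).toList = [','] from rfl, show ("" : String).toList = [] from rfl]
  simp only [String.toList_ofList, pv_replace_filter]
  rw [pv_filter_chain]
  simp only [List.isEmpty_cons, Bool.false_eq_true, if_false, Option.map_some, Option.getD_some]
  rw [pv_splitOn_comma]
  rw [show (0 : Int) = 2 * ((0 : Nat) : Int) by norm_num]
  rw [pv_loop_eq (pvSplitTok ((PySem.Str.slice data (some 1) (some (-1))).toList.filter pvKeep) []) [] 0 ""]
  rw [pv_scan_eq (PySem.Str.slice data (some 1) (some (-1))).toList [] none []]
  simp [pv_pairT_none]
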